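-- pv_equiv track=rewrite | github.com/snarang181/tensor-alive | fuzz/diff_test.py | generate_all_pairs
-- ===== SOURCE A (Python) =====
-- import itertools
-- from typing import Dict, List, Optional, Tuple
--
-- def generate_all_pairs(
--     pass_names: List[str], max_len: int = 2
-- ) -> List[Tuple[str, str]]:
--     """Generate all pairs of pass orderings up to max_len passes."""
--     pairs = []
--     for length in range(1, max_len + 1):
--         perms = list(itertools.permutations(pass_names, length))
--         for i, p1 in enumerate(perms):
--             for p2 in perms[i + 1 :]:
--                 if set(p1) == set(p2) and p1 != p2:  # Same passes, different order
--                     pairs.append(("_".join(p1), "_".join(p2)))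
--     return pairs
-- ===== SOURCE B (Python) =====
-- import itertools
-- from typing import List, Tuple
--
--
-- def generate_all_pairs(
--     pass_names: List[str], max_len: int = 2
-- ) -> List[Tuple[str, str]]:
--     """Generate all pairs of pass orderings up to max_len passes.
--
--     Instead of testing every pair of permutations, group the permutations by
--     their element set once; for each permutation, only its own (small) group
--     is scanned for partners, in the same (i, j)-lexicographic output order.
--     """
--     pairs = []
--     for length in range(1, max_len + 1):
--         perms = list(itertools.permutations(pass_names, length))
--         groups = {}
--         for j, p in enumerate(perms):
--             groups.setdefault(tuple(sorted(set(p))), []).append((j, p))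
--         for i, p1 in enumerate(perms):
--             for j, p2 in groups[tuple(sorted(set(p1)))]:
--                 if i < j and p1 != p2:
--                     pairs.append(("_".join(p1), "_".join(p2)))
--     return pairs
-- ===== Notes on version B (the rewrite author's own statement) =====
-- stated objective: faster
-- what changed: Instead of comparing every ordered pair of permutations, B builds a dict grouping permutations (with their indices) by their element set (key = tuple(sorted(set(p)))) and, for each permutation, scans only its own group for later differing partners, producing the pairs in the same (i, j)-lexicographic order.
import Mathlib
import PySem

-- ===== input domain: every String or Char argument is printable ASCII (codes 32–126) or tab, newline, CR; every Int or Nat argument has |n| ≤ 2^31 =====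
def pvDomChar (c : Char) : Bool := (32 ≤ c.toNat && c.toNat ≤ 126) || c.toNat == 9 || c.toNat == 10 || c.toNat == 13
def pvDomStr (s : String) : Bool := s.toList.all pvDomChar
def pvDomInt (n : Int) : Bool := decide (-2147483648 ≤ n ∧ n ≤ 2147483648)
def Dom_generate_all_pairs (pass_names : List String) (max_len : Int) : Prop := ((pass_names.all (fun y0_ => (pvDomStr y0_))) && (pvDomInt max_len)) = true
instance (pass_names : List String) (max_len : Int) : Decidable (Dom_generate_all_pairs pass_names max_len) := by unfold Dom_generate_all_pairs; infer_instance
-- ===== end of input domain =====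

-- B groups permutations by their element set so each permutation only scans its own group
-- for partners (same output, same order); objective: faster.


-- ===== PORT A =====
def generate_all_pairs (pass_names : List String) (max_len : Int) : List (String × String) :=
  (PySem.List.pyRange 1 (max_len + 1) 1).foldl (fun pairs length =>
    let perms := PySem.List.permutations pass_names length.toNat
    (PySem.List.enumerate perms).foldl (fun pairs ip =>
      (PySem.List.slice perms (some (ip.1 + 1)) none).foldl (fun pairs p2 =>
        if PySem.Set.equal (PySem.Set.ofList ip.2) (PySem.Set.ofList p2) && ip.2 != p2 then
          pairs ++ [(PySem.Str.join "_" ip.2, PySem.Str.join "_" p2)]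
        else pairs) pairs) pairs) []

-- ===== PORT B =====
-- tuple(sorted(set(p))) : the canonical grouping key of a permutation
def pvKey (p : List String) : List String :=
  PySem.List.sorted (PySem.Set.ofList p) (fun x => x) false

def generate_all_pairs_alt (pass_names : List String) (max_len : Int) : List (String × String) :=
  (PySem.List.pyRange 1 (max_len + 1) 1).foldl (fun pairs length =>
    let perms := PySem.List.permutations pass_names length.toNat
    let groups := (PySem.List.enumerate perms).foldl
      (fun d jp => d.modify (pvKey jp.2) [] (· ++ [jp])) PySem.Dict.empty
    (PySem.List.enumerate perms).foldl (fun pairs ip =>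
      (groups.getD (pvKey ip.2) []).foldl (fun pairs jp =>
        if decide (ip.1 < jp.1) && ip.2 != jp.2 then
          pairs ++ [(PySem.Str.join "_" ip.2, PySem.Str.join "_" jp.2)]
        else pairs) pairs) pairs) []

-- ===== PRECONDITION & SPEC =====
def Spec_generate_all_pairs (pass_names : List String) (max_len : Int) (out : List (String × String)) : Prop := out = generate_all_pairs_alt pass_names max_len
instance (pass_names : List String) (max_len : Int) (out : List (String × String)) : Decidable (Spec_generate_all_pairs pass_names max_len out) := by unfold Spec_generate_all_pairs; infer_instance

-- ===== CLAIM (what is proved, stated in full; the proofs are below) =====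
def Claim_equal_generate_all_pairs : Prop := ∀ (pass_names : List String) (max_len : Int), Dom_generate_all_pairs pass_names max_len → Spec_generate_all_pairs pass_names max_len (generate_all_pairs pass_names max_len)

-- ===== LEMMAS AND PROOFS =====

-- key equality is Python set equality
theorem pvKey_beq (a b : List String) :
    (pvKey a == pvKey b) = PySem.Set.equal (PySem.Set.ofList b) (PySem.Set.ofList a) := by
  rcases hb : PySem.Set.equal (PySem.Set.ofList b) (PySem.Set.ofList a) with _ | _
  · simp only [beq_eq_false_iff_ne, ne_eq]
    intro h
    unfold pvKey at h
    rw [PySem.List.sorted_id_eq_sorted_id_iff_perm] at h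
    have := (PySem.Set.equal_iff (PySem.Set.ofList b) (PySem.Set.ofList a)).2
      (fun x => ⟨fun hx => (h.mem_iff).2 hx, fun hx => (h.mem_iff).1 hx⟩)
    rw [hb] at this; cases this
  · have h := (PySem.Set.equal_iff _ _).1 hb
    have hperm : (PySem.Set.ofList a).Perm (PySem.Set.ofList b) := by
      refine (List.perm_ext_iff_of_nodup (PySem.Set.nodup_ofList _) (PySem.Set.nodup_ofList _)).2 ?_
      intro x; exact (h x).symm
    simp only [beq_iff_eq]
    unfold pvKey
    exact (PySem.List.sorted_id_eq_sorted_id_iff_perm _ _).2 hperm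

-- enumerate-filter on "index > i and q" is drop-filter
theorem enumFilter (perms : List (List String)) (q : List String → Bool) :
    ∀ (s i : Int),
      ((PySem.List.enumerate perms s).filter (fun jp => decide (i < jp.1) && q jp.2)).map (·.2)
        = (perms.drop (i + 1 - s).toNat).filter q := by
  induction perms with
  | nil => intro s i; simp [PySem.List.enumerate]
  | cons p ps ih =>
    intro s i
    rw [PySem.List.enumerate_cons]
    by_cases h : i < s
    · have h0 : (i + 1 - s).toNat = 0 := by omega
      have h1 : (i + 1 - (s + 1)).toNat = 0 := by omega
      have htail := ih (s + 1) i
      rw [h1, List.drop_zero] at htail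
      simp only [List.filter_cons, decide_eq_true h, Bool.true_and, h0, List.drop_zero]
      rcases hq : q p with _ | _
      · simpa [hq] using htail
      · simp [htail]
    · have h0 : (i + 1 - s).toNat = (i + 1 - (s + 1)).toNat + 1 := by omega
      simp only [List.filter_cons, decide_eq_false h, Bool.false_and, h0, List.drop_succ_cons]
      exact ih (s + 1) i

-- the two per-permutation inner loops agree
theorem inner_eq (perms : List (List String)) (ip : Int × List String)
    (hip : ip ∈ PySem.List.enumerate perms) (acc : List (String × String)) :
    (PySem.List.slice perms (some (ip.1 + 1)) none).foldl (fun pairs p2 =>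
        if PySem.Set.equal (PySem.Set.ofList ip.2) (PySem.Set.ofList p2) && ip.2 != p2 then
          pairs ++ [(PySem.Str.join "_" ip.2, PySem.Str.join "_" p2)]
        else pairs) acc
    = (((PySem.List.enumerate perms).foldl
          (fun d jp => d.modify (pvKey jp.2) [] (· ++ [jp])) PySem.Dict.empty).getD (pvKey ip.2) []).foldl
        (fun pairs jp =>
          if decide (ip.1 < jp.1) && ip.2 != jp.2 then
            pairs ++ [(PySem.Str.join "_" ip.2, PySem.Str.join "_" jp.2)]
          else pairs) acc := by
  have hi : 0 ≤ ip.1 := by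
    rcases (PySem.List.mem_enumerate_iff perms 0 ip).1 hip with ⟨k, hk, hkeq⟩
    rw [hkeq]; omega
  -- rewrite the dict built by the loop as a fold over key-tagged pairs, then read it off
  have hdict : ((PySem.List.enumerate perms).foldl
        (fun d jp => d.modify (pvKey jp.2) [] (· ++ [jp])) PySem.Dict.empty).getD (pvKey ip.2) []
      = (PySem.List.enumerate perms).filter (fun jp => pvKey jp.2 == pvKey ip.2) := by
    have hfold : ((PySem.List.enumerate perms).map (fun jp => (pvKey jp.2, jp))).foldl
          (fun d p => d.modify p.1 [] (· ++ [p.2])) PySem.Dict.empty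
        = (PySem.List.enumerate perms).foldl
          (fun d jp => d.modify (pvKey jp.2) [] (· ++ [jp])) PySem.Dict.empty := by
      rw [List.foldl_map]
    rw [← hfold, PySem.Dict.getD_foldl_modify_append]
    simp [List.filter_map, Function.comp_def]
  rw [hdict]
  rw [PySem.List.foldl_append_if, PySem.List.foldl_append_if]
  -- both sides are acc ++ (same filtered list).map …
  congr 1
  rw [List.filter_filter]
  have hcong : (PySem.List.enumerate perms).filter
        (fun jp => (decide (ip.1 < jp.1) && ip.2 != jp.2) && (pvKey jp.2 == pvKey ip.2))
      = (PySem.List.enumerate perms).filter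
        (fun jp => decide (ip.1 < jp.1) &&
          (PySem.Set.equal (PySem.Set.ofList ip.2) (PySem.Set.ofList jp.2) && ip.2 != jp.2)) := by
    apply List.filter_congr
    intro x _
    rw [pvKey_beq]
    rw [Bool.and_assoc, Bool.and_comm (ip.2 != x.2)]
  rw [hcong]
  have hslice : PySem.List.slice perms (some (ip.1 + 1)) none = perms.drop (ip.1 + 1 - 0).toNat := by
    rw [PySem.List.slice_from perms (by omega)]
    norm_num
  rw [hslice]
  rw [← enumFilter perms
    (fun p2 => PySem.Set.equal (PySem.Set.ofList ip.2) (PySem.Set.ofList p2) && ip.2 != p2) 0 ip.1]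
  rw [List.map_map]
  rfl

-- ===== VERDICT (by name: the statement is the Claim_ definition above) =====
theorem generate_all_pairs_spec : Claim_equal_generate_all_pairs := by
  intro pass_names max_len _
  unfold Spec_generate_all_pairs generate_all_pairs generate_all_pairs_alt
  apply PySem.List.foldl_congr_mem
  intro acc length _
  dsimp only
  apply PySem.List.foldl_congr_mem
  intro acc' ip hip
  exact inner_eq _ ip hip acc'
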